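-- pv_equiv track=rewrite | github.com/MauriceCalvert/andante | motifs/subject_gen/validator.py | is_melodically_valid
-- ===== SOURCE A (Python) =====
-- def _midi_intervals(midi: tuple[int, ...]) -> list[int]:
--     """Semitone intervals between adjacent MIDI pitches."""
--     return [midi[i + 1] - midi[i] for i in range(len(midi) - 1)]
--
-- def is_melodically_valid(midi: tuple[int, ...]) -> bool:
--     """Check MIDI pitch sequence for forbidden intervals."""
--     ivs = _midi_intervals(midi)
--     for iv in ivs:
--         a = abs(iv)
--         if a == 6 or a in (10, 11):
--             return False
--     for i in range(len(ivs) - 1):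
--         if abs(ivs[i]) > 2 and abs(ivs[i + 1]) > 2:
--             if (ivs[i] > 0) == (ivs[i + 1] > 0):
--                 return False
--     if len(midi) >= 4:
--         for i in range(len(midi) - 3):
--             if abs(midi[i + 3] - midi[i]) == 6:
--                 return False
--     return True
-- ===== SOURCE B (Python) =====
-- def is_melodically_valid(midi: tuple[int, ...]) -> bool:
--     """Check MIDI pitch sequence for forbidden intervals (single fused pass)."""
--     n = len(midi)
--     prev = None
--     for i in range(n - 1):
--         iv = midi[i + 1] - midi[i]
--         a = abs(iv)
--         if a in (6, 10, 11):
--             return False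
--         if prev is not None and abs(prev) > 2 and a > 2 and (prev > 0) == (iv > 0):
--             return False
--         if i + 3 < n and abs(midi[i + 3] - midi[i]) == 6:
--             return False
--         prev = iv
--     return True
-- ===== Notes on version B (the rewrite author's own statement) =====
-- stated objective: alternative
-- what changed: Fuses A's three separate scans (and the interval list materialised by _midi_intervals) into one indexed pass that maintains only the previous adjacent interval.
import Mathlib
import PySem

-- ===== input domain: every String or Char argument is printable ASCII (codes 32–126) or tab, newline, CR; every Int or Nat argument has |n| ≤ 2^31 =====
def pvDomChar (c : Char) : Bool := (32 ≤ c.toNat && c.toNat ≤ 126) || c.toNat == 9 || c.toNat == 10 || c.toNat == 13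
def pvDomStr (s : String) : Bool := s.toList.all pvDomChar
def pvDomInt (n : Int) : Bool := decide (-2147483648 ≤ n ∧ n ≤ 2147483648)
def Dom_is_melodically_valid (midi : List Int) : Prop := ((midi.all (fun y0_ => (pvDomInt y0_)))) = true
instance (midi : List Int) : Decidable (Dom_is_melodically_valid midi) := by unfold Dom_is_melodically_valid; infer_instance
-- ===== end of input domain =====

-- B fuses A's three separate scans (and the interval list materialised by _midi_intervals)
-- into one indexed pass that carries only the previous adjacent interval (objective: alternative).

-- ===== PORT A =====
-- helper _midi_intervals; every index i, i+1 drawn from the range is in bounds, so pyGetD … 0 is exact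
def mviIvs (midi : List Int) : List Int :=
  (PySem.List.pyRange 0 ((midi.length : Int) - 1) 1).map
    (fun i => PySem.List.pyGetD midi (i + 1) 0 - PySem.List.pyGetD midi i 0)

-- each Python 'for … return False' loop is its List.any; branches kept in source order
def is_melodically_valid (midi : List Int) : Bool :=
  let ivs := mviIvs midi
  if ivs.any (fun iv => iv.natAbs == 6 || iv.natAbs == 10 || iv.natAbs == 11) then false
  else if (PySem.List.pyRange 0 ((ivs.length : Int) - 1) 1).any (fun i =>
      let x := PySem.List.pyGetD ivs i 0
      let y := PySem.List.pyGetD ivs (i + 1) 0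
      (2 < x.natAbs && 2 < y.natAbs) && (decide (0 < x) == decide (0 < y))) then false
  else if decide (4 ≤ midi.length) && (PySem.List.pyRange 0 ((midi.length : Int) - 3) 1).any (fun i =>
      (PySem.List.pyGetD midi (i + 3) 0 - PySem.List.pyGetD midi i 0).natAbs == 6) then false
  else true

-- ===== PORT B =====
-- the fused loop body of Source B; indices i, i+1, i+3 are nonnegative and guarded in range, so getD … 0 is exact
def mviGo (midi : List Int) (prev : Option Int) (i : Nat) : Bool :=
  if i + 1 < midi.length then
    let iv := midi.getD (i + 1) 0 - midi.getD i 0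
    if iv.natAbs == 6 || iv.natAbs == 10 || iv.natAbs == 11 then false
    else if (match prev with
             | some p => (2 < p.natAbs && 2 < iv.natAbs) && (decide (0 < p) == decide (0 < iv))
             | none => false) then false
    else if i + 3 < midi.length && (midi.getD (i + 3) 0 - midi.getD i 0).natAbs == 6 then false
    else mviGo midi (some iv) (i + 1)
  else true
termination_by midi.length - i

def is_melodically_valid_alt (midi : List Int) : Bool := mviGo midi none 0

-- ===== PRECONDITION & SPEC =====
def Spec_is_melodically_valid (midi : List Int) (out : Bool) : Prop := out = is_melodically_valid_alt midi
instance (midi : List Int) (out : Bool) : Decidable (Spec_is_melodically_valid midi out) := by unfold Spec_is_melodically_valid; infer_instance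

-- ===== CLAIM (what is proved, stated in full; the proofs are below) =====
def Claim_equal_is_melodically_valid : Prop := ∀ (midi : List Int), Dom_is_melodically_valid midi → Spec_is_melodically_valid midi (is_melodically_valid midi)

-- ===== LEMMAS AND PROOFS =====

-- the adjacent interval at index j
def mviD (midi : List Int) (j : Nat) : Int := midi.getD (j + 1) 0 - midi.getD j 0

def mviBad1 (x : Int) : Prop := x.natAbs = 6 ∨ x.natAbs = 10 ∨ x.natAbs = 11

def mviPair (p q : Int) : Prop := 2 < p.natAbs ∧ 2 < q.natAbs ∧ (0 < p ↔ 0 < q)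

-- what remains to be checked from position i on, with pending previous interval `prev`
def mviOK (midi : List Int) (prev : Option Int) (i : Nat) : Prop :=
  (∀ j, i ≤ j → j + 1 < midi.length → ¬ mviBad1 (mviD midi j)) ∧
  (∀ p, prev = some p → i + 1 < midi.length → ¬ mviPair p (mviD midi i)) ∧
  (∀ j, i ≤ j → j + 2 < midi.length → ¬ mviPair (mviD midi j) (mviD midi (j + 1))) ∧
  (∀ j, i ≤ j → j + 3 < midi.length →
     (midi.getD (j + 3) 0 - midi.getD j 0).natAbs ≠ 6)

lemma mviBad1_bool (x : Int) :
    ((x.natAbs == 6 || x.natAbs == 10 || x.natAbs == 11) = true) ↔ mviBad1 x := by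
  simp [mviBad1, or_assoc]

lemma mviPair_bool (p q : Int) :
    (((2 < p.natAbs && 2 < q.natAbs) && (decide (0 < p) == decide (0 < q))) = true) ↔ mviPair p q := by
  simp [mviPair, decide_eq_decide, and_assoc]

lemma mviIvs_eq (midi : List Int) :
    mviIvs midi = (List.range (midi.length - 1)).map (mviD midi) := by
  unfold mviIvs
  rw [PySem.List.pyRange_one]
  have h : ((midi.length : Int) - 1 - 0).toNat = midi.length - 1 := by omega
  rw [h, List.map_map]
  apply List.map_congr_left
  intro k hk
  simp only [List.mem_range] at hk
  simp [mviD, Function.comp]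
  rw [show ((k:Int) + 1) = ((k+1 : Nat) : Int) by push_cast; ring,
     PySem.List.pyGetD_natCast, List.getD_eq_getElem?_getD]

lemma mviIvs_len (midi : List Int) : (mviIvs midi).length = midi.length - 1 := by
  rw [mviIvs_eq]; simp

lemma mviIvs_getD (midi : List Int) (k : Nat) (hk : k < midi.length - 1) :
    PySem.List.pyGetD (mviIvs midi) (k : Int) 0 = mviD midi k := by
  rw [PySem.List.pyGetD_natCast, mviIvs_eq, List.getD_eq_getElem?_getD]
  simp [hk]

lemma mviAny1 (midi : List Int) :
    ((mviIvs midi).any (fun iv => iv.natAbs == 6 || iv.natAbs == 10 || iv.natAbs == 11) = true)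
    ↔ ∃ j, j + 1 < midi.length ∧ mviBad1 (mviD midi j) := by
  rw [mviIvs_eq]
  simp only [List.any_eq_true, List.mem_map, List.mem_range]
  constructor
  · rintro ⟨iv, ⟨j, hj, rfl⟩, hb⟩; exact ⟨j, by omega, (mviBad1_bool _).mp hb⟩
  · rintro ⟨j, hj, hb⟩; exact ⟨mviD midi j, ⟨j, by omega, rfl⟩, (mviBad1_bool _).mpr hb⟩

lemma mviAny2 (midi : List Int) :
    ((PySem.List.pyRange 0 (((mviIvs midi).length : Int) - 1) 1).any (fun i =>
      let x := PySem.List.pyGetD (mviIvs midi) i 0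
      let y := PySem.List.pyGetD (mviIvs midi) (i + 1) 0
      (2 < x.natAbs && 2 < y.natAbs) && (decide (0 < x) == decide (0 < y))) = true)
    ↔ ∃ j, j + 2 < midi.length ∧ mviPair (mviD midi j) (mviD midi (j + 1)) := by
  simp only [List.any_eq_true, PySem.List.mem_pyRange_one, mviIvs_len]
  constructor
  · rintro ⟨i, ⟨h0, hlt⟩, hb⟩
    obtain ⟨k, rfl⟩ : ∃ k : Nat, i = (k : Int) := ⟨i.toNat, by omega⟩
    have hk : k + 2 < midi.length := by omega
    rw [show ((k:Int) + 1) = ((k+1 : Nat) : Int) by push_cast; ring] at hb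
    simp only [mviIvs_getD midi k (by omega), mviIvs_getD midi (k+1) (by omega)] at hb
    exact ⟨k, hk, (mviPair_bool _ _).mp hb⟩
  · rintro ⟨j, hj, hp⟩
    refine ⟨(j : Int), ⟨by omega, by omega⟩, ?_⟩
    rw [show ((j:Int) + 1) = ((j+1 : Nat) : Int) by push_cast; ring]
    simp only [mviIvs_getD midi j (by omega), mviIvs_getD midi (j+1) (by omega)]
    exact (mviPair_bool _ _).mpr hp

lemma mviAny3 (midi : List Int) :
    ((decide (4 ≤ midi.length) && (PySem.List.pyRange 0 ((midi.length : Int) - 3) 1).any (fun i =>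
      (PySem.List.pyGetD midi (i + 3) 0 - PySem.List.pyGetD midi i 0).natAbs == 6)) = true)
    ↔ ∃ j, j + 3 < midi.length ∧ (midi.getD (j + 3) 0 - midi.getD j 0).natAbs = 6 := by
  simp only [Bool.and_eq_true, decide_eq_true_eq, List.any_eq_true, PySem.List.mem_pyRange_one]
  constructor
  · rintro ⟨-, i, ⟨h0, hlt⟩, hb⟩
    obtain ⟨k, rfl⟩ : ∃ k : Nat, i = (k : Int) := ⟨i.toNat, by omega⟩
    rw [show ((k:Int) + 3) = ((k+3 : Nat) : Int) by push_cast; ring] at hb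
    rw [PySem.List.pyGetD_natCast, PySem.List.pyGetD_natCast] at hb
    exact ⟨k, by omega, by simpa using hb⟩
  · rintro ⟨j, hj, h6⟩
    refine ⟨by omega, (j : Int), ⟨by omega, by omega⟩, ?_⟩
    rw [show ((j:Int) + 3) = ((j+3 : Nat) : Int) by push_cast; ring]
    rw [PySem.List.pyGetD_natCast, PySem.List.pyGetD_natCast]
    simpa using h6

lemma mviGo_iff (midi : List Int) : ∀ k i prev, midi.length - i = k →
    (mviGo midi prev i = true ↔ mviOK midi prev i) := by
  intro k
  induction k using Nat.strong_induction_on with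
  | _ k ih =>
    intro i prev hk
    rw [mviGo]
    by_cases h : i + 1 < midi.length
    · simp only [if_pos h]
      set iv := midi.getD (i + 1) 0 - midi.getD i 0 with hiv
      have hivd : iv = mviD midi i := rfl
      by_cases g1 : (iv.natAbs == 6 || iv.natAbs == 10 || iv.natAbs == 11) = true
      · simp only [g1, if_true]
        constructor
        · intro hf; cases hf
        · rintro ⟨c1, -, -, -⟩
          exact absurd ((mviBad1_bool iv).mp g1) (hivd ▸ c1 i le_rfl h)
      · simp only [g1, Bool.false_eq_true, if_false]
        by_cases g2 : (match prev with
             | some p => (2 < p.natAbs && 2 < iv.natAbs) && (decide (0 < p) == decide (0 < iv))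
             | none => false) = true
        · simp only [g2, if_true]
          constructor
          · intro hf; cases hf
          · rintro ⟨-, c2, -, -⟩
            match prev, g2 with
            | some p, g2 => exact absurd ((mviPair_bool p iv).mp g2) (hivd ▸ c2 p rfl h)
        · simp only [g2, Bool.false_eq_true, if_false]
          by_cases g3 : (decide (i + 3 < midi.length) && ((midi.getD (i + 3) 0 - midi.getD i 0).natAbs == 6)) = true
          · simp only [g3, if_true]
            constructor
            · intro hf; cases hf
            · rintro ⟨-, -, -, c4⟩
              simp only [Bool.and_eq_true, decide_eq_true_eq, beq_iff_eq] at g3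
              exact absurd g3.2 (c4 i le_rfl g3.1)
          · simp only [g3, Bool.false_eq_true, if_false]
            rw [ih (midi.length - (i+1)) (by omega) (i+1) (some iv) rfl]
            constructor
            · rintro ⟨c1', c2', c3', c4'⟩
              refine ⟨?_, ?_, ?_, ?_⟩
              · intro j hj hjl
                rcases Nat.eq_or_lt_of_le hj with rfl | hj'
                · rw [← hivd]; exact fun hb => g1 ((mviBad1_bool iv).mpr hb)
                · exact c1' j hj' hjl
              · intro p hp hlt hpair
                match prev, hp with
                | some p, rfl =>
                  exact g2 ((mviPair_bool p iv).mpr (hivd ▸ hpair))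
              · intro j hj hjl
                rcases Nat.eq_or_lt_of_le hj with rfl | hj'
                · exact fun hp => c2' (mviD midi i) (by rw [hivd]) (by omega) hp
                · exact c3' j hj' hjl
              · intro j hj hjl
                rcases Nat.eq_or_lt_of_le hj with rfl | hj'
                · intro h6
                  exact g3 (by simp only [Bool.and_eq_true, decide_eq_true_eq, beq_iff_eq]; exact ⟨hjl, h6⟩)
                · exact c4' j hj' hjl
            · rintro ⟨c1, c2, c3, c4⟩
              refine ⟨fun j hj => c1 j (by omega), ?_, fun j hj => c3 j (by omega),
                fun j hj => c4 j (by omega)⟩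
              intro p hp hlt hpair
              have : iv = p := by injection hp
              exact c3 i le_rfl hlt (by rw [← hivd, this]; exact hpair)
    · simp only [if_neg h]
      constructor
      · intro _
        refine ⟨fun j hj hjl => absurd hjl (by omega), fun p hp hlt => absurd hlt h,
          fun j hj hjl => absurd hjl (by omega), fun j hj hjl => absurd hjl (by omega)⟩
      · intro _; trivial

lemma mviA_iff (midi : List Int) :
    is_melodically_valid midi = true ↔ mviOK midi none 0 := by
  unfold is_melodically_valid
  simp only []
  split_ifs with h1 h2 h3
  · simp only [false_iff]
    rintro ⟨c1, -, -, -⟩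
    obtain ⟨j, hj, hb⟩ := (mviAny1 midi).mp h1
    exact c1 j (Nat.zero_le _) hj hb
  · simp only [false_iff]
    rintro ⟨-, -, c3, -⟩
    obtain ⟨j, hj, hp⟩ := (mviAny2 midi).mp h2
    exact c3 j (Nat.zero_le _) hj hp
  · simp only [false_iff]
    rintro ⟨-, -, -, c4⟩
    obtain ⟨j, hj, h6⟩ := (mviAny3 midi).mp h3
    exact c4 j (Nat.zero_le _) hj h6
  · simp only [true_iff]
    refine ⟨?_, ?_, ?_, ?_⟩
    · intro j _ hj hb
      exact h1 ((mviAny1 midi).mpr ⟨j, hj, hb⟩)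
    · intro p hp; cases hp
    · intro j _ hj hp
      exact h2 ((mviAny2 midi).mpr ⟨j, hj, hp⟩)
    · intro j _ hj h6
      exact h3 ((mviAny3 midi).mpr ⟨j, hj, h6⟩)

-- ===== VERDICT (by name: the statement is the Claim_ definition above) =====
theorem is_melodically_valid_spec : Claim_equal_is_melodically_valid := by
  intro midi _
  unfold Spec_is_melodically_valid is_melodically_valid_alt
  rcases h : mviGo midi none 0 with _ | _
  · rcases hA : is_melodically_valid midi with _ | _
    · rfl
    · exact absurd ((mviGo_iff midi _ 0 none rfl).mpr ((mviA_iff midi).mp hA)) (by simp [h])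
  · exact (mviA_iff midi).mpr ((mviGo_iff midi _ 0 none rfl).mp h)
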